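-- pv_equiv track=rewrite | github.com/KotisKotlyandii/lessons1 | ege22/35.py | f
-- ===== SOURCE A (Python) =====
-- def f(x):
--     L,M = 0,9
--     while x > 5:
--         L += 1
--         if M > x % 10:
--             M = x % 10
--         x //= 10
--     return '%d\n%d' % (L,M)
-- ===== SOURCE B (Python) =====
-- def f(x):
--     if x <= 5:
--         return '0\n9'
--     s = str(x)
--     L = len(s) - 1 + (s[0] > '5')
--     M = min(int(d) for d in s[len(s) - L:])
--     return '%d\n%d' % (L, M)
-- ===== Notes on version B (the rewrite author's own statement) =====
-- stated objective: faster
-- what changed: Replaces the digit-popping while-loop (with running minimum) by a closed form on the decimal string: L = len(str(x)) - 1 (+1 if the leading digit exceeds 5) and M = minimum of the last L digits.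
import Mathlib
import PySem

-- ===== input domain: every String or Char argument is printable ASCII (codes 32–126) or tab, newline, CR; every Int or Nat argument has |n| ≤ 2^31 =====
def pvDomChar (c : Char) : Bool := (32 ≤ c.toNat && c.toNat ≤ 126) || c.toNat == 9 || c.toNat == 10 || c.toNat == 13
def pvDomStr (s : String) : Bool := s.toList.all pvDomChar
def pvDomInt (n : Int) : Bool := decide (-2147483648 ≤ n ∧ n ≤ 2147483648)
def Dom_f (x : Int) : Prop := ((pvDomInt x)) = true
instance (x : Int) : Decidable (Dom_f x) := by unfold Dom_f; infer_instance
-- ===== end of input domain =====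

-- B replaces A's digit-popping loop by a closed form on str(x): L from the length and
-- leading digit, M as the minimum of the last L digits (objective: simpler/closed form).

-- ===== PORT A =====
-- '%d\n%d' % (L, M)  — str(L) + newline + str(M)
def pvFmt (L M : Int) : String := String.ofList (PySem.Int.toChars L ++ '\n' :: PySem.Int.toChars M)

-- while x > 5: L += 1; if M > x % 10: M = x % 10; x //= 10
-- (fuel-based structural recursion; x.toNat + 1 steps always suffice since x shrinks by //10)
def pvLoop (fuel : Nat) (L M x : Int) : String :=
  match fuel with
  | 0 => pvFmt L M
  | fuel + 1 =>
    if 5 < x then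
      pvLoop fuel (L + 1) (if PySem.Int.mod x 10 < M then PySem.Int.mod x 10 else M)
        (PySem.Int.floordiv x 10)
    else pvFmt L M

def f (x : Int) : String := pvLoop (x.toNat + 1) 0 9 x

-- ===== PORT B =====
-- int(d) for a single character d (always a decimal digit of str(x) here)
def pvDigitVal (c : Char) : Int := (PySem.Int.ofChars? [c]).getD 0

def f_alt (x : Int) : String :=
  if x ≤ 5 then "0\n9"
  else
    let s := PySem.Int.toChars x
    let L : Int := PySem.List.len s - 1 + (if '5' < PySem.List.pyGetD s 0 ' ' then 1 else 0)
    -- min(int(d) for d in s[len(s)-L:]); the slice is nonempty here, so min never raises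
    let M : Int := (PySem.List.min? ((PySem.List.slice s (some (PySem.List.len s - L)) none).map pvDigitVal) id).getD 9
    pvFmt L M

-- ===== PRECONDITION & SPEC =====
def Spec_f (x : Int) (out : String) : Prop := out = f_alt x
instance (x : Int) (out : String) : Decidable (Spec_f x out) := by unfold Spec_f; infer_instance

-- ===== CLAIM (what is proved, stated in full; the proofs are below) =====
def Claim_equal_f : Prop := ∀ (x : Int), Dom_f x → Spec_f x (f x)

-- ===== LEMMAS AND PROOFS =====

-- Decimal digit characters (big-endian) of a natural number, as produced by PySem.Int.toChars
def digs (m : Nat) : List Char := Nat.toDigits 10 m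

-- B's loop count, as a function of the digit string
def Lb (m : Nat) : Int :=
  ((digs m).length : Int) - 1 + (if '5' < (digs m).getD 0 ' ' then 1 else 0)

-- B's minimum, as a function of the digit string
def Mb (m : Nat) : Int :=
  (PySem.List.min? (((digs m).drop ((digs m).length - (Lb m).toNat)).map pvDigitVal) id).getD 9

-- fuel irrelevance for Nat.toDigitsCore
lemma tdc_fuel (f : Nat) : ∀ (g n : Nat) (ds : List Char), n < f → n < g →
    Nat.toDigitsCore 10 f n ds = Nat.toDigitsCore 10 g n ds := by
  induction f with
  | zero => intro g n ds hf _; omega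
  | succ f ih =>
    intro g n ds hf hg
    match g, hg with
    | g + 1, _ =>
      simp only [Nat.toDigitsCore]
      by_cases h0 : n / 10 = 0
      · simp [h0]
      · simp only [h0, if_false]
        exact ih g (n / 10) _ (by omega) (by omega)

-- accumulator append for Nat.toDigitsCore
lemma tdc_app (f : Nat) : ∀ (n : Nat) (ds : List Char),
    Nat.toDigitsCore 10 f n ds = Nat.toDigitsCore 10 f n [] ++ ds := by
  induction f with
  | zero => intro n ds; simp [Nat.toDigitsCore]
  | succ f ih =>
    intro n ds
    simp only [Nat.toDigitsCore]
    by_cases h0 : n / 10 = 0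
    · simp [h0]
    · simp only [h0, if_false]
      rw [ih (n / 10) ((n % 10).digitChar :: ds), ih (n / 10) [(n % 10).digitChar]]
      simp

lemma digs_lt10 (m : Nat) (h : m < 10) : digs m = [Nat.digitChar m] := by
  interval_cases m <;> decide

lemma digs_ge10 (m : Nat) (h : 10 ≤ m) :
    digs m = digs (m / 10) ++ [Nat.digitChar (m % 10)] := by
  show Nat.toDigits 10 m = Nat.toDigits 10 (m / 10) ++ [Nat.digitChar (m % 10)]
  unfold Nat.toDigits
  have hstep : Nat.toDigitsCore 10 (m + 1) m [] =
      Nat.toDigitsCore 10 m (m / 10) [Nat.digitChar (m % 10)] := by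
    simp only [Nat.toDigitsCore]
    have h0 : ¬ m / 10 = 0 := by omega
    simp [h0]
  rw [hstep, tdc_fuel m (m / 10 + 1) (m / 10) _ (by omega) (by omega),
      tdc_app (m / 10 + 1) (m / 10) [Nat.digitChar (m % 10)]]

lemma digs_ne_nil (m : Nat) : digs m ≠ [] := by
  by_cases h : m < 10
  · rw [digs_lt10 m h]; simp
  · rw [digs_ge10 m (by omega)]; simp

lemma digitVal_digitChar (d : Nat) (h : d < 10) : pvDigitVal (Nat.digitChar d) = (d : Int) := by
  interval_cases d <;> decide

lemma five_lt_digitChar (d : Nat) (h : d < 10) : '5' < Nat.digitChar d ↔ 5 < d := by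
  interval_cases d <;> simp <;> decide

lemma head_digs_ge10 (m : Nat) (h : 10 ≤ m) :
    (digs m).getD 0 ' ' = (digs (m / 10)).getD 0 ' ' := by
  rw [digs_ge10 m h]
  have := digs_ne_nil (m / 10)
  cases hd : digs (m / 10) with
  | nil => exact absurd hd this
  | cons a t => simp

lemma Lb_bounds (m : Nat) (h : 6 ≤ m) : 1 ≤ Lb m ∧ Lb m ≤ ((digs m).length : Int) := by
  by_cases h10 : m < 10
  · rw [Lb, digs_lt10 m h10]
    simp [(five_lt_digitChar m h10).mpr (by omega)]
  · have hlen : (digs m).length = (digs (m / 10)).length + 1 := by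
      rw [digs_ge10 m (by omega)]; simp
    have hne := digs_ne_nil (m / 10)
    have hlen' : 1 ≤ (digs (m / 10)).length := by
      cases hd : digs (m / 10) with
      | nil => exact absurd hd hne
      | cons a t => simp
    rw [Lb]
    split <;> omega

lemma Lb_base1 (m : Nat) (h6 : 6 ≤ m) (h10 : m < 10) : Lb m = 1 := by
  rw [Lb, digs_lt10 m h10]
  simp [(five_lt_digitChar m h10).mpr (by omega)]

lemma Lb_base2 (m : Nat) (h10 : 10 ≤ m) (h5 : m / 10 ≤ 5) : Lb m = 1 := by
  have h1 : 1 ≤ m / 10 := by omega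
  have hh : ¬ ('5' < Nat.digitChar (m / 10)) := by
    rw [five_lt_digitChar (m / 10) (by omega)]; omega
  rw [Lb, head_digs_ge10 m h10, digs_ge10 m h10, digs_lt10 (m / 10) (by omega)]
  simp [hh]

lemma Lb_rec (m : Nat) (h10 : 10 ≤ m) (_h6 : 6 ≤ m / 10) : Lb m = Lb (m / 10) + 1 := by
  have hlen : (digs m).length = (digs (m / 10)).length + 1 := by
    rw [digs_ge10 m h10]; simp
  rw [Lb, Lb, hlen, head_digs_ge10 m h10]
  split <;> omega

-- PySem.List.min? on Int with key id: helper facts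
lemma min?_isSome (xs : List Int) (h : xs ≠ []) : (PySem.List.min? xs id).isSome := by
  cases xs with
  | nil => exact absurd rfl h
  | cons y ys =>
    show (List.foldl _ (some y) ys).isSome
    clear h
    induction ys generalizing y with
    | nil => rfl
    | cons z zs ih =>
      show (List.foldl _ (if id z < id y then some z else some y) zs).isSome
      split <;> exact ih _

lemma min?_append_singleton (zs : List Int) (v w : Int)
    (hw : PySem.List.min? zs id = some w) :
    PySem.List.min? (zs ++ [v]) id = some (if v < w then v else w) := by
  unfold PySem.List.min? at hw ⊢
  rw [List.foldl_append, hw]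
  show (if id v < id w then some v else some w) = some (if v < w then v else w)
  simp only [id_eq]
  split <;> rfl

lemma Mb_base1 (m : Nat) (h6 : 6 ≤ m) (h10 : m < 10) : Mb m = (m : Int) := by
  rw [Mb, Lb_base1 m h6 h10, digs_lt10 m h10]
  simp [PySem.List.min?, digitVal_digitChar m h10]

lemma Mb_base2 (m : Nat) (h10 : 10 ≤ m) (h5 : m / 10 ≤ 5) : Mb m = ((m % 10 : Nat) : Int) := by
  rw [Mb, Lb_base2 m h10 h5, digs_ge10 m h10, digs_lt10 (m / 10) (by omega)]
  simp [PySem.List.min?, digitVal_digitChar (m % 10) (by omega)]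

lemma Mb_rec (m : Nat) (h10 : 10 ≤ m) (h6 : 6 ≤ m / 10) :
    Mb m = min ((m % 10 : Nat) : Int) (Mb (m / 10)) := by
  have hb' := Lb_bounds (m / 10) h6
  have hlen : (digs m).length = (digs (m / 10)).length + 1 := by
    rw [digs_ge10 m h10]; simp
  have hk : (digs m).length - (Lb m).toNat
      = (digs (m / 10)).length - (Lb (m / 10)).toNat := by
    rw [Lb_rec m h10 h6]; omega
  have hkle : (digs m).length - (Lb m).toNat ≤ (digs (m / 10)).length := by omega
  set k := (digs (m / 10)).length - (Lb (m / 10)).toNat with hkdef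
  have hzs : ((digs (m / 10)).drop k).length = (Lb (m / 10)).toNat := by
    rw [List.length_drop]; omega
  have hne : ((digs (m / 10)).drop k).map pvDigitVal ≠ [] := by
    intro hc
    have := congrArg List.length hc
    simp at this
    omega
  obtain ⟨w, hw⟩ := Option.isSome_iff_exists.mp (min?_isSome _ hne)
  have hMb' : Mb (m / 10) = w := by rw [Mb, ← hkdef, hw]; rfl
  rw [Mb, hk, digs_ge10 m h10, List.drop_append_of_le_length (by omega)]
  simp only [List.map_append, List.map_cons, List.map_nil]
  rw [digitVal_digitChar (m % 10) (by omega)]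
  rw [min?_append_singleton _ _ w hw, hMb']
  simp only [Option.getD_some]
  omega

lemma Mb_le9 (m : Nat) : 6 ≤ m → Mb m ≤ 9 := by
  induction m using Nat.strong_induction_on with
  | _ m ih =>
    intro h6
    by_cases h10 : m < 10
    · rw [Mb_base1 m h6 h10]; omega
    · by_cases h5 : m / 10 ≤ 5
      · rw [Mb_base2 m (by omega) h5]
        have : m % 10 < 10 := by omega
        omega
      · rw [Mb_rec m (by omega) (by omega)]
        have := ih (m / 10) (by omega) (by omega)
        omega

lemma loop_stop (fuel : Nat) (L M x : Int) (h : ¬ 5 < x) : pvLoop fuel L M x = pvFmt L M := by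
  cases fuel with
  | zero => rfl
  | succ fuel => rw [pvLoop, if_neg h]

lemma loop_closed (fuel : Nat) : ∀ (m : Nat) (L M : Int), 6 ≤ m → m < fuel →
    pvLoop fuel L M (m : Int) = pvFmt (L + Lb m) (min M (Mb m)) := by
  induction fuel with
  | zero => intro m L M h6 hf; omega
  | succ fuel ih =>
    intro m L M h6 hf
    rw [pvLoop]
    rw [if_pos (show (5:Int) < (m : Int) by exact_mod_cast (by omega : 5 < m))]
    have hmod : PySem.Int.mod (m : Int) 10 = ((m % 10 : Nat) : Int) := by
      exact_mod_cast PySem.Int.mod_natCast m 10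
    have hdiv : PySem.Int.floordiv (m : Int) 10 = ((m / 10 : Nat) : Int) := by
      exact_mod_cast PySem.Int.floordiv_natCast m 10
    rw [hmod, hdiv]
    by_cases h5 : m / 10 ≤ 5
    · rw [loop_stop fuel _ _ _
        (show ¬ (5:Int) < ((m / 10 : Nat) : Int) by exact_mod_cast (by omega : ¬ 5 < m / 10))]
      by_cases h10 : m < 10
      · rw [Lb_base1 m h6 h10, Mb_base1 m h6 h10]
        have hm : m % 10 = m := by omega
        rw [hm]
        congr 1
        split <;> omega
      · rw [Lb_base2 m (by omega) h5, Mb_base2 m (by omega) h5]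
        congr 1
        split <;> omega
    · rw [ih (m / 10) _ _ (by omega) (by omega)]
      rw [Lb_rec m (by omega) (by omega), Mb_rec m (by omega) (by omega)]
      congr 1
      · omega
      · split <;> omega

lemma toChars_nonneg (x : Int) (h : 0 ≤ x) : PySem.Int.toChars x = digs x.toNat := by
  rw [PySem.Int.toChars, if_neg (by omega)]; rfl

lemma f_alt_closed (m : Nat) (h6 : 6 ≤ m) : f_alt (m : Int) = pvFmt (Lb m) (Mb m) := by
  have hb := Lb_bounds m h6
  have h59 : ¬ ((m : Int) ≤ 5) := by omega
  simp only [f_alt, if_neg h59]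
  rw [toChars_nonneg (m : Int) (by omega)]
  simp only [Int.toNat_natCast, PySem.List.len_eq, PySem.List.pyGetD_zero]
  have hLb : ((digs m).length : Int) - 1 + (if '5' < (digs m).getD 0 ' ' then (1:Int) else 0)
      = Lb m := rfl
  rw [hLb, PySem.List.slice_from (digs m) (show (0:Int) ≤ ((digs m).length : Int) - Lb m by omega)]
  have hT : (((digs m).length : Int) - Lb m).toNat = (digs m).length - (Lb m).toNat := by
    omega
  rw [hT]
  rfl

-- ===== VERDICT (by name: the statement is the Claim_ definition above) =====
theorem f_spec : Claim_equal_f := by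
  unfold Claim_equal_f
  intro x _
  unfold Spec_f f
  by_cases hx : x ≤ 5
  · rw [loop_stop _ _ _ _ (by omega)]
    have halt : f_alt x = "0\n9" := by simp [f_alt, hx]
    rw [halt]
    decide
  · have hm : ((x.toNat : Nat) : Int) = x := Int.toNat_of_nonneg (by omega)
    set m := x.toNat with hmdef
    have h6 : 6 ≤ m := by omega
    rw [← hm, loop_closed (m + 1) m 0 9 h6 (by omega), f_alt_closed m h6, zero_add,
        min_eq_right (Mb_le9 m h6)]
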